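-- pv_equiv track=rewrite | github.com/mwalimufranzen/annelid_hb | GenomeToolkit/bck/intron_chk_bck.py | adjust_intron_boundaries
-- ===== SOURCE A (Python) =====
-- def adjust_intron_boundaries(seq, start, end, orientation):
--     """Adjust the intron boundaries based on the closest splice site (GT-AG or CT-AC for antisense).
--        The search covers 6 nucleotides on either side of the original boundary."""
--     SEARCH_SPAN = 6  # We will look 6 nucleotides on either side of the boundary
--
--     # Initialize variables to track the closest positions
--     closest_start = start
--     closest_end = end
--     closest_start_distance = SEARCH_SPAN + 1  # Set larger than max search span
--     closest_end_distance = SEARCH_SPAN + 1  # Set larger than max search span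
--
--     if orientation == '+':
--         # Search for GT-AG splice sites around the boundary
--         for i in range(-SEARCH_SPAN, SEARCH_SPAN + 1):
--             # Check GT for the start
--             if seq[start + i:start + i + 2] == 'GT':
--                 if abs(i) < closest_start_distance:
--                     closest_start = start + i
--                     closest_start_distance = abs(i)
--
--             # Check AG for the end
--             if seq[end + i:end + i + 2] == 'AG':
--                 if abs(i) < closest_end_distance:
--                     closest_end = end + i
--                     closest_end_distance = abs(i)
--     else:
--         # For antisense, look for CT-AC splice sites
--         for i in range(-SEARCH_SPAN, SEARCH_SPAN + 1):
--             # Check CT for the start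
--             if seq[start + i:start + i + 2] == 'CT':
--                 if abs(i) < closest_start_distance:
--                     closest_start = start + i
--                     closest_start_distance = abs(i)
--
--             # Check AC for the end
--             if seq[end + i:end + i + 2] == 'AC':
--                 if abs(i) < closest_end_distance:
--                     closest_end = end + i
--                     closest_end_distance = abs(i)
--
--     # Adjust positions to 1-based indexing for GFF output
--     return closest_start + 1, closest_end + 2
-- ===== SOURCE B (Python) =====
-- def _find_nearest(seq, pos, motif):
--     """First splice-site position within 6 nt of pos, nearer first, -d before +d; pos if none."""
--     for d in range(0, 7):
--         if seq[pos - d:pos - d + 2] == motif: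
--             return pos - d
--         if seq[pos + d:pos + d + 2] == motif:
--             return pos + d
--     return pos
--
--
-- def adjust_intron_boundaries(seq, start, end, orientation):
--     """Adjust the intron boundaries based on the closest splice site (GT-AG or CT-AC for antisense)."""
--     start_motif, end_motif = ('GT', 'AG') if orientation == '+' else ('CT', 'AC')
--     return _find_nearest(seq, start, start_motif) + 1, _find_nearest(seq, end, end_motif) + 2
-- ===== Notes on version B (the rewrite author's own statement) =====
-- stated objective: simpler
-- what changed: A tracks a running minimum distance over one scan of all 13 offsets in [-6,6] per boundary; B searches outward from each boundary (d = 0..6, -d before +d) via a find_nearest helper and returns on the first matching window, with no distance bookkeeping.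
import Mathlib
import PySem

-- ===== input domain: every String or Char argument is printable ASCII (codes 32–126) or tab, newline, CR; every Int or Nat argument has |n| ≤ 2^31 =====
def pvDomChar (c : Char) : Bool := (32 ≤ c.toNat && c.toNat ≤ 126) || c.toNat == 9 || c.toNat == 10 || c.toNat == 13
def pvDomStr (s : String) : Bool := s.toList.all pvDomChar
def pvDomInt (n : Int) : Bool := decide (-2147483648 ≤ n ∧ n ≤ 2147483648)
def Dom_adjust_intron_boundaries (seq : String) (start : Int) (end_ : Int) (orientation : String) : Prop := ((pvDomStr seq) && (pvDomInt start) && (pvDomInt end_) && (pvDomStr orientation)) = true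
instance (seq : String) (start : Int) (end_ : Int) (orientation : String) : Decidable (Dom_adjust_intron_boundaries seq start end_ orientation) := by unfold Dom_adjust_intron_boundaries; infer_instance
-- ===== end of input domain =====

-- B replaces A's two closest-tracking scans over [-6,6] by one outward first-match search per
-- boundary (d = 0..6, -d before +d), a simpler decomposition with the same results.

-- ===== PORT A =====
def adjust_intron_boundaries (seq : String) (start : Int) (end_ : Int) (orientation : String) : Int × Int :=
  let SEARCH_SPAN : Int := 6
  -- state: ((closest_start, closest_start_distance), (closest_end, closest_end_distance))
  let init : (Int × Int) × (Int × Int) := ((start, SEARCH_SPAN + 1), (end_, SEARCH_SPAN + 1))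
  let st :=
    if orientation == "+" then
      (PySem.List.pyRange (-SEARCH_SPAN) (SEARCH_SPAN + 1) 1).foldl
        (fun (s : (Int × Int) × (Int × Int)) i =>
          ((if PySem.Str.slice seq (some (start + i)) (some (start + i + 2)) == "GT" then
              (if |i| < s.1.2 then (start + i, |i|) else s.1) else s.1),
           (if PySem.Str.slice seq (some (end_ + i)) (some (end_ + i + 2)) == "AG" then
              (if |i| < s.2.2 then (end_ + i, |i|) else s.2) else s.2))) init
    else
      (PySem.List.pyRange (-SEARCH_SPAN) (SEARCH_SPAN + 1) 1).foldl
        (fun (s : (Int × Int) × (Int × Int)) i =>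
          ((if PySem.Str.slice seq (some (start + i)) (some (start + i + 2)) == "CT" then
              (if |i| < s.1.2 then (start + i, |i|) else s.1) else s.1),
           (if PySem.Str.slice seq (some (end_ + i)) (some (end_ + i + 2)) == "AC" then
              (if |i| < s.2.2 then (end_ + i, |i|) else s.2) else s.2))) init
  (st.1.1 + 1, st.2.1 + 2)

-- ===== PORT B =====
def findNearestGo (seq : String) (pos : Int) (motif : String) : Nat → Int → Int
  | 0, _ => pos
  | fuel + 1, d =>
    if PySem.Str.slice seq (some (pos - d)) (some (pos - d + 2)) == motif then pos - d
    else if PySem.Str.slice seq (some (pos + d)) (some (pos + d + 2)) == motif then pos + d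
    else findNearestGo seq pos motif fuel (d + 1)

def find_nearest (seq : String) (pos : Int) (motif : String) : Int :=
  findNearestGo seq pos motif 7 0

def adjust_intron_boundaries_alt (seq : String) (start : Int) (end_ : Int) (orientation : String) : Int × Int :=
  let motifs := if orientation == "+" then ("GT", "AG") else ("CT", "AC")
  (find_nearest seq start motifs.1 + 1, find_nearest seq end_ motifs.2 + 2)

-- ===== PRECONDITION & SPEC =====
def Spec_adjust_intron_boundaries (seq : String) (start : Int) (end_ : Int) (orientation : String) (out : Int × Int) : Prop := out = adjust_intron_boundaries_alt seq start end_ orientation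
instance (seq : String) (start : Int) (end_ : Int) (orientation : String) (out : Int × Int) : Decidable (Spec_adjust_intron_boundaries seq start end_ orientation out) := by unfold Spec_adjust_intron_boundaries; infer_instance

-- ===== CLAIM (what is proved, stated in full; the proofs are below) =====
def Claim_equal_adjust_intron_boundaries : Prop := ∀ (seq : String) (start : Int) (end_ : Int) (orientation : String), Dom_adjust_intron_boundaries seq start end_ orientation → Spec_adjust_intron_boundaries seq start end_ orientation (adjust_intron_boundaries seq start end_ orientation)

-- ===== LEMMAS AND PROOFS =====

-- does the 2-char window at offset i from pos match the motif?
def pvHit (seq : String) (pos : Int) (motif : String) (i : Int) : Bool :=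
  PySem.Str.slice seq (some (pos + i)) (some (pos + i + 2)) == motif

def pvList : List Int := [-6, -5, -4, -3, -2, -1, 0, 1, 2, 3, 4, 5, 6]

-- offset chosen by A's closest-tracking fold, hits abstracted
def pvFoldOff (h : Int → Bool) : Int :=
  (pvList.foldl
    (fun (s : Int × Int) i => if h i then (if |i| < s.2 then (i, |i|) else s) else s) (0, 7)).1

-- the same fold over precomputed (offset, distance) pairs zipped with the hit bits
def pvPairs : List (Int × Int) :=
  [(-6, 6), (-5, 5), (-4, 4), (-3, 3), (-2, 2), (-1, 1), (0, 0),
   (1, 1), (2, 2), (3, 3), (4, 4), (5, 5), (6, 6)]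

def pvFoldOffL (bs : List Bool) : Int :=
  ((pvPairs.zip bs).foldl
    (fun (s : Int × Int) p => if p.2 then (if p.1.2 < s.2 then p.1 else s) else s)
    ((0 : Int), (7 : Int))).1

-- offset chosen by B's outward search, hits abstracted
def pvGoOff (h : Int → Bool) : Nat → Int → Int
  | 0, _ => 0
  | fuel + 1, d => if h (-d) then -d else if h d then d else pvGoOff h fuel (d + 1)

-- B's search, fully unrolled over the 13 hit bits (with B's duplicate d = 0 test kept)
def pvGoB (a b c d e f g p q r u v w : Bool) : Int :=
  if g then 0 else if g then 0
  else if f then -1 else if p then 1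
  else if e then -2 else if q then 2
  else if d then -3 else if r then 3
  else if c then -4 else if u then 4
  else if b then -5 else if v then 5
  else if a then -6 else if w then 6 else 0

theorem pvGo_eq (h : Int → Bool) :
    pvGoOff h 7 0 = pvGoB (h (-6)) (h (-5)) (h (-4)) (h (-3)) (h (-2)) (h (-1)) (h 0)
      (h 1) (h 2) (h 3) (h 4) (h 5) (h 6) := by
  simp only [pvGoOff, pvGoB]
  norm_num

set_option maxHeartbeats 1000000 in
theorem pvCore13 : ∀ a b c d e f g p q r u v w : Bool,
    pvFoldOffL [a, b, c, d, e, f, g, p, q, r, u, v, w] = pvGoB a b c d e f g p q r u v w := by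
  decide

-- the closest-tracking fold only reads the hit bits: zip form
theorem pvFoldZip (h : Int → Bool) (l : List Int) : ∀ (s : Int × Int),
    l.foldl (fun (s : Int × Int) i => if h i then (if |i| < s.2 then (i, |i|) else s) else s) s
      = ((l.map (fun i => (i, |i|))).zip (l.map h)).foldl
          (fun (s : Int × Int) p => if p.2 then (if p.1.2 < s.2 then p.1 else s) else s) s := by
  induction l with
  | nil => intro s; rfl
  | cons x xs ih =>
    intro s
    simp only [List.map_cons, List.zip_cons_cons, List.foldl_cons]
    exact ih _

theorem pvFoldOff_eq (h : Int → Bool) : pvFoldOff h = pvFoldOffL (pvList.map h) := by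
  unfold pvFoldOff pvFoldOffL
  rw [pvFoldZip]
  rw [show pvList.map (fun i => (i, |i|)) = pvPairs from by decide]

-- A's per-boundary fold equals pos plus the offset-only fold
theorem pvFoldShift (h : Int → Bool) (pos : Int) (l : List Int) : ∀ (c d : Int),
    l.foldl (fun (s : Int × Int) i => if h i then (if |i| < s.2 then (pos + i, |i|) else s) else s) (pos + c, d)
      = (pos + (l.foldl (fun (s : Int × Int) i => if h i then (if |i| < s.2 then (i, |i|) else s) else s) (c, d)).1,
         (l.foldl (fun (s : Int × Int) i => if h i then (if |i| < s.2 then (i, |i|) else s) else s) (c, d)).2) := by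
  induction l with
  | nil => intro c d; simp
  | cons x xs ih =>
    intro c d
    simp only [List.foldl_cons]
    by_cases hx : h x
    · simp only [hx, if_true]
      by_cases hd : |x| < d
      · simp only [hd, if_true]; exact ih x |x|
      · simp only [hd, if_false]
        exact ih c d
    · simp only [hx]
      exact ih c d

-- B's search equals pos plus the offset-only search
theorem pvGoShift (seq : String) (pos : Int) (motif : String) : ∀ (fuel : Nat) (d : Int),
    findNearestGo seq pos motif fuel d = pos + pvGoOff (pvHit seq pos motif) fuel d := by
  intro fuel
  induction fuel with
  | zero => intro d; simp [findNearestGo, pvGoOff]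
  | succ n ih =>
    intro d
    simp only [findNearestGo, pvGoOff, pvHit, sub_eq_add_neg]
    split_ifs with h1 h2
    · rfl
    · rfl
    · exact ih _

-- one boundary of A equals B's find_nearest
theorem pvTrack (h : Int → Bool) (pos : Int) :
    (pvList.foldl
      (fun (s : Int × Int) i => if h i then (if |i| < s.2 then (pos + i, |i|) else s) else s)
      (pos, 6 + 1)).1
      = pos + pvGoOff h 7 0 := by
  rw [show ((pos, (6 + 1 : Int)) : Int × Int) = (pos + 0, (6 + 1 : Int)) from by norm_num]
  rw [pvFoldShift]
  dsimp only
  rw [show (pvList.foldl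
      (fun (s : Int × Int) i => if h i then (if |i| < s.2 then (i, |i|) else s) else s)
      (0, 6 + 1)).1 = pvFoldOff h from rfl]
  rw [pvFoldOff_eq]
  rw [show pvList.map h = [h (-6), h (-5), h (-4), h (-3), h (-2), h (-1), h 0,
        h 1, h 2, h 3, h 4, h 5, h 6] from rfl]
  rw [pvCore13, pvGo_eq]

theorem pvRangeList : PySem.List.pyRange (-6) (6 + 1) 1 = pvList := by decide

-- ===== VERDICT (by name: the statement is the Claim_ definition above) =====
theorem adjust_intron_boundaries_spec : Claim_equal_adjust_intron_boundaries := by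
  intro seq start end_ orientation _
  show adjust_intron_boundaries seq start end_ orientation
      = adjust_intron_boundaries_alt seq start end_ orientation
  unfold adjust_intron_boundaries adjust_intron_boundaries_alt
  cases hor : (orientation == "+") <;>
    simp only [if_true, if_false, Bool.false_eq_true, pvRangeList] <;>
    [rw [PySem.List.foldl_prod_mk
        (f := fun (t : Int × Int) i =>
          if PySem.Str.slice seq (some (start + i)) (some (start + i + 2)) == "CT" then
            (if |i| < t.2 then (start + i, |i|) else t) else t)
        (g := fun (t : Int × Int) i =>
          if PySem.Str.slice seq (some (end_ + i)) (some (end_ + i + 2)) == "AC" then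
            (if |i| < t.2 then (end_ + i, |i|) else t) else t)];
     rw [PySem.List.foldl_prod_mk
        (f := fun (t : Int × Int) i =>
          if PySem.Str.slice seq (some (start + i)) (some (start + i + 2)) == "GT" then
            (if |i| < t.2 then (start + i, |i|) else t) else t)
        (g := fun (t : Int × Int) i =>
          if PySem.Str.slice seq (some (end_ + i)) (some (end_ + i + 2)) == "AG" then
            (if |i| < t.2 then (end_ + i, |i|) else t) else t)]] <;>
    refine Prod.ext ?_ ?_ <;>
    simp only [find_nearest] <;>
    rw [pvTrack, pvGoShift] <;> rfl
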